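-- pv_equiv track=rewrite | github.com/venysssssssssss/extract-on-demand-sp | exemplo_sap_gui_export.py | _preferred_input_order
-- ===== SOURCE A (Python) =====
-- def _preferred_input_order(side: str, size: int) -> list[int]:
--     if size <= 0:
--         return []
--     if side == "high":
--         primary = 1 if size > 1 else 0
--     else:
--         primary = 0
--     order = [primary]
--     for idx in range(size):
--         if idx not in order:
--             order.append(idx)
--     return order
-- ===== SOURCE B (Python) =====
-- def _preferred_input_order(side: str, size: int) -> list[int]:
--     order = list(range(size))
--     if side == "high" and size > 1:
--         order[0], order[1] = order[1], order[0]
--     return order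
-- ===== Notes on version B (the rewrite author's own statement) =====
-- stated objective: faster
-- what changed: Replaces the quadratic membership-checking append loop with direct construction of list(range(size)) plus one swap of the first two elements when side=='high' and size>1.
import Mathlib
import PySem

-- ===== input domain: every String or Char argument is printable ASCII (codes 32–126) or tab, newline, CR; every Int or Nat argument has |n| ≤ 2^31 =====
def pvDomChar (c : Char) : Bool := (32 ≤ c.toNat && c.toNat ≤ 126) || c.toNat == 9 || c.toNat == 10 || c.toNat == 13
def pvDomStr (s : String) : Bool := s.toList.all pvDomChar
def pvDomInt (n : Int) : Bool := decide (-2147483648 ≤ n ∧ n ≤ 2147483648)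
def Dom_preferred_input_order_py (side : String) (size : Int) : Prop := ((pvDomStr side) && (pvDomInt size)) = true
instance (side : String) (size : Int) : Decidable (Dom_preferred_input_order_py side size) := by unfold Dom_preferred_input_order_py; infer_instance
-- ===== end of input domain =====

-- B builds list(range(size)) directly and swaps the first two elements when side=="high" and size>1,
-- replacing A's O(n^2) membership-checking append loop with an O(n) construction (objective: faster).
-- ===== PORT A =====
def preferred_input_order_py (side : String) (size : Int) : List Int :=
  if size ≤ 0 then []
  else
    let primary : Int := if side == "high" then (if 1 < size then 1 else 0) else 0
    (PySem.List.pyRange 0 size 1).foldl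
      (fun order idx => if idx ∈ order then order else order ++ [idx]) [primary]

-- ===== PORT B =====
def preferred_input_order_py_alt (side : String) (size : Int) : List Int :=
  let order := PySem.List.pyRange 0 size 1
  if side == "high" && decide (1 < size) then
    match order with
    | a :: b :: t => b :: a :: t
    | l => l
  else order

-- ===== PRECONDITION & SPEC =====
def Spec_preferred_input_order_py (side : String) (size : Int) (out : List Int) : Prop := out = preferred_input_order_py_alt side size
instance (side : String) (size : Int) (out : List Int) : Decidable (Spec_preferred_input_order_py side size out) := by unfold Spec_preferred_input_order_py; infer_instance

-- ===== CLAIM (what is proved, stated in full; the proofs are below) =====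
def Claim_equal_preferred_input_order_py : Prop := ∀ (side : String) (size : Int), Dom_preferred_input_order_py side size → Spec_preferred_input_order_py side size (preferred_input_order_py side size)

-- ===== LEMMAS AND PROOFS =====

-- ===== VERDICT (by name: the statement is the Claim_ definition above) =====
-- A's loop appends each not-yet-seen index; over a duplicate-free list this is
-- "append the elements not already in the accumulator, in order".
theorem foldl_append_not_mem (l a : List Int) (h : l.Nodup) :
    l.foldl (fun o i => if i ∈ o then o else o ++ [i]) a
      = a ++ l.filter (fun x => !(decide (x ∈ a))) := by
  induction l generalizing a with
  | nil => simp
  | cons x l ih =>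
    rcases List.nodup_cons.mp h with ⟨hx, hl⟩
    by_cases hxa : x ∈ a
    · simp [List.foldl_cons, hxa, ih a hl]
    · simp only [List.foldl_cons, if_neg hxa]
      rw [ih (a ++ [x]) hl]
      have hfil : l.filter (fun y => !(decide (y ∈ a ++ [x])))
          = l.filter (fun y => !(decide (y ∈ a))) := by
        apply List.filter_congr
        intro y hy
        have : y ≠ x := fun hyx => hx (hyx ▸ hy)
        simp [List.mem_append, this]
      rw [hfil]
      simp [hxa, List.append_assoc]

theorem preferred_input_order_py_spec : Claim_equal_preferred_input_order_py := by
  intro side size _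
  unfold Spec_preferred_input_order_py
  unfold preferred_input_order_py preferred_input_order_py_alt
  by_cases hle : size ≤ 0
  · simp [hle, PySem.List.pyRange_one_eq_nil hle]
  · push_neg at hle
    simp only [if_neg (by omega : ¬ size ≤ 0)]
    rw [foldl_append_not_mem _ _ (PySem.List.nodup_pyRange_one 0 size)]
    by_cases hhigh : side == "high"
    · by_cases h2 : 1 < size
      · -- primary = 1, range = 0 :: 1 :: t
        have hr : PySem.List.pyRange 0 size 1
            = 0 :: 1 :: PySem.List.pyRange 2 size 1 := by
          rw [PySem.List.pyRange_one_cons (by omega : (0:Int) < size)]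
          norm_num
          rw [PySem.List.pyRange_one_cons (by omega : (1:Int) < size)]
          norm_num
        rw [hr]
        simp [hhigh, h2]
        intros
        omega
      · -- side high, size = 1: primary = 0
        have hsz : size = 1 := by omega
        subst hsz
        have h01 : PySem.List.pyRange (0:Int) 1 1 = [0] := by decide
        simp [hhigh, h01]
    · -- primary = 0, range = 0 :: t with t ⊆ [1, size)
      have hr : PySem.List.pyRange 0 size 1
          = 0 :: PySem.List.pyRange 1 size 1 :=
        PySem.List.pyRange_one_cons (by omega)
      rw [hr]
      simp [hhigh]
      intros
      omega
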